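-- pv_equiv track=rewrite | github.com/frederikho/dynamic-coalition-formation | viz/viz_service.py | generate_coalition_structures
-- ===== SOURCE A (Python) =====
-- def generate_all_partitions(elements):
--     """
--     Generate all possible partitions of a set.
--     A partition is a way of grouping elements into non-empty subsets.
--
--     This generates Bell number B(n) partitions for n elements.
--     """
--     if len(elements) == 0:
--         yield []
--         return
--
--     if len(elements) == 1:
--         yield [[elements[0]]]
--         return
--
--     first = elements[0]
--     rest = elements[1:]
--
--     # For each partition of the rest
--     for partition in generate_all_partitions(rest):
--         # Add first element to each existing subset
--         for i, subset in enumerate(partition):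
--             yield partition[:i] + [subset + [first]] + partition[i+1:]
--         # Add first element as a new singleton subset
--         yield [[first]] + partition
--
-- def partition_to_state_name(partition):
--     """
--     Convert a partition to coalition structure notation.
--
--     Examples:
--         [[A], [B], [C]] -> '( )' (all singletons)
--         [[A, B], [C]] -> '(AB)'
--         [[A, B, C]] -> '(ABC)'
--         [[A, C], [B]] -> '(AC)'
--     """
--     # Filter out singletons and sort coalitions
--     coalitions = sorted(
--         [sorted(subset) for subset in partition if len(subset) > 1],
--         key=lambda x: (len(x), x)
--     )
--
--     if not coalitions:
--         return '( )'
--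
--     # Join coalitions
--     coalition_strs = [''.join(coal) for coal in coalitions]
--     return ''.join(f'({c})' for c in coalition_strs)
--
-- def generate_coalition_structures(n: int) -> list:
--     """
--     Generate all possible coalition structure names for n players.
--     Uses letters W, T, C for n=3 (to match existing convention),
--     and A, B, C, D, E, F for other player counts.
--
--     Returns list of state names following Bell numbers:
--     n=2: 2, n=3: 5, n=4: 15, n=5: 52, n=6: 203, etc.
--     """
--     # Use consistent player naming
--     if n == 3:
--         player_letters = ['W', 'T', 'C']
--     else:
--         player_letters = ['A', 'B', 'C', 'D', 'E', 'F', 'G', 'H'][:n]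
--
--     # Generate all partitions
--     all_partitions = list(generate_all_partitions(player_letters))
--
--     # Convert to state names
--     state_names = []
--     seen = set()
--
--     for partition in all_partitions:
--         state_name = partition_to_state_name(partition)
--         if state_name not in seen:
--             state_names.append(state_name)
--             seen.add(state_name)
--
--     # Sort: all singletons first, then by size and alphabetically
--     def sort_key(name):
--         if name == '( )':
--             return (0, '')
--         # Count coalitions and total size
--         coalitions = name.strip('()').split(')(')
--         return (1, len(coalitions), sum(len(c) for c in coalitions), name)
--
--     state_names.sort(key=sort_key)
--
--     return state_names
-- ===== SOURCE B (Python) =====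
-- def generate_coalition_structures(n: int) -> list:
--     """Enumerate set partitions as restricted-growth strings (block-number
--     vectors) built iteratively, then group players by block number."""
--     if n == 3:
--         player_letters = ['W', 'T', 'C']
--     else:
--         player_letters = ['A', 'B', 'C', 'D', 'E', 'F', 'G', 'H'][:n]
--     m = len(player_letters)
--
--     # codes[..] assigns a block number to every player: each new entry is at
--     # most one more than the maximum of the entries already in the code.
--     codes = [[]]
--     for _ in player_letters:
--         codes = [[v] + code for code in codes
--                  for v in range(max(code, default=-1) + 2)]
--
--     names = set()
--     for code in codes:
--         blocks = [[] for _ in range(m)]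
--         for b, ch in zip(code, player_letters):
--             blocks[b].append(ch)
--         coalitions = sorted([sorted(block) for block in blocks if len(block) > 1],
--                             key=lambda x: (len(x), x))
--         if not coalitions:
--             name = '( )'
--         else:
--             name = ''.join('(' + ''.join(c) + ')' for c in coalitions)
--         names.add(name)
--
--     def sort_key(name):
--         if name == '( )':
--             return (0, 0, 0, '')
--         coalitions = name.strip('()').split(')(')
--         return (1, len(coalitions), sum(len(c) for c in coalitions), name)
--
--     return sorted(names, key=sort_key)
-- ===== Notes on version B (the rewrite author's own statement) =====
-- stated objective: alternative
-- what changed: Replaces the recursive partition generator (which builds each partition by list slicing and insertion) with an iterative restricted-growth-string table: block-number vectors are grown one player at a time, and each vector is turned into a partition by a single grouping pass before the same naming/dedup/sort pipeline.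
import Mathlib
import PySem

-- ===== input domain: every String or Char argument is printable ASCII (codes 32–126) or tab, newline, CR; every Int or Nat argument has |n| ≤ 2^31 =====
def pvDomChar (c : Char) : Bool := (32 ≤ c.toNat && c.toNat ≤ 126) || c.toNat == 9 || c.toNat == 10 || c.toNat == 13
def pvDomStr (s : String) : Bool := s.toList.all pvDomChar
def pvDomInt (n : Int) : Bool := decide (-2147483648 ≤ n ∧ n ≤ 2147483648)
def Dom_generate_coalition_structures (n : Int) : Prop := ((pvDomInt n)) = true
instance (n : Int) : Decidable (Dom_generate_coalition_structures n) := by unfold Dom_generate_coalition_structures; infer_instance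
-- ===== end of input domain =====

-- B replaces the recursive partition generator by an iterative restricted-growth-string
-- table (block-number vectors) plus a grouping pass (objective: alternative algorithm).

-- ===== PORT A =====

-- generate_all_partitions: the recursive generator, materialised in yield order
def pvGenAllPartitions : List Char → List (List (List Char))
  | [] => [[]]
  | [x] => [[[x]]]
  | first :: rest =>
      (pvGenAllPartitions rest).flatMap (fun partition =>
        ((PySem.List.enumerate partition).map (fun q =>
          PySem.List.slice partition none (some q.1) ++ [q.2 ++ [first]] ++
            PySem.List.slice partition (some (q.1 + 1)) none))
        ++ [[first] :: partition])

-- partition_to_state_name; the Python subsets are lists of 1-char strings, held here as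
-- List Char, so ''.join(coal) is the list itself and f'({c})' is '(' :: c ++ [')']
def pvPartitionToStateName (partition : List (List Char)) : String :=
  let coalitions := PySem.List.sorted2
    ((partition.filter (fun s => s.length > 1)).map (fun s => PySem.List.sorted s (fun c => c)))
    (fun x => (x.length : Int)) (fun x => x)
  if coalitions = [] then "( )"
  else String.ofList (PySem.Chars.join [] (coalitions.map (fun c => '(' :: (c ++ [')']))))

-- sort_key: Python's heterogeneous tuple key (0,'') / (1, count, total, name) encoded as a
-- lexicographic pair (Int, String).  On every name this function is applied to, count ≤ 4 and
-- total ≤ 8, so 10000 + 100*count + total orders exactly as the Python tuple (1, count, total)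
-- does, and (0, '') sits below all of them — the encoding is order-exact on the names used.
def pvSortKey (name : String) : Lex (Int × String) :=
  if name = "( )" then toLex ((0 : Int), "")
  else
    let coalitions := PySem.Chars.splitOn (PySem.Chars.stripChars name.toList ['(', ')']) [')', '(']
    toLex ((10000 + 100 * (coalitions.length : Int) +
      ((coalitions.map (fun c => (c.length : Int))).sum), name))

-- the body of generate_coalition_structures after player_letters is fixed
def pvPipelineA (player_letters : List Char) : List String :=
  PySem.List.sorted
    (((pvGenAllPartitions player_letters).foldl
        (fun (p : List String × PySem.Set String) partition =>
          let state_name := pvPartitionToStateName partition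
          if PySem.Set.contains p.2 state_name then p
          else (p.1 ++ [state_name], PySem.Set.add p.2 state_name))
        ([], PySem.Set.empty)).1)
    pvSortKey

def generate_coalition_structures (n : Int) : List String :=
  pvPipelineA (if n = 3 then ['W', 'T', 'C']
    else PySem.List.slice ['A', 'B', 'C', 'D', 'E', 'F', 'G', 'H'] none (some n))

-- ===== PORT B =====

-- codes = [[v] + code for code in codes for v in range(max(code, default=-1) + 2)],
-- run once per player (the loop body does not read the loop variable)
def pvExtendCodes (codes : List (List Int)) : List (List Int) :=
  codes.flatMap (fun code =>
    (PySem.List.pyRange 0 (PySem.List.maxD code (fun v => v) (-1) + 2) 1).map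
      (fun v => v :: code))

def pvBuildCodes (player_letters : List Char) : List (List Int) :=
  player_letters.foldl (fun codes _ => pvExtendCodes codes) [[]]

-- blocks = [[] for _ in range(m)]; for b, ch in zip(code, player_letters): blocks[b].append(ch)
-- (block numbers are nonnegative and below m for every generated code, so toNat/set/getD
--  never hit the negative or out-of-range cases)
def pvBlocksOf (player_letters : List Char) (code : List Int) : List (List Char) :=
  (code.zip player_letters).foldl
    (fun bl q => bl.set q.1.toNat (bl.getD q.1.toNat [] ++ [q.2]))
    (List.replicate player_letters.length [])

def pvNameOfCode (player_letters : List Char) (code : List Int) : String :=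
  let coalitions := PySem.List.sorted2
    (((pvBlocksOf player_letters code).filter (fun b => b.length > 1)).map
      (fun b => PySem.List.sorted b (fun c => c)))
    (fun x => (x.length : Int)) (fun x => x)
  if coalitions = [] then "( )"
  else String.ofList (PySem.Chars.join [] (coalitions.map (fun c => '(' :: (c ++ [')']))))

-- Source B's sort_key is character-for-character the same function as A's (its tuple
-- (0,0,0,'') encodes to the same pair, 0*10000+0*100+0 = 0), so both ports share pvSortKey
def pvPipelineB (player_letters : List Char) : List String :=
  PySem.List.sorted
    ((pvBuildCodes player_letters).foldl
      (fun names code => PySem.Set.add names (pvNameOfCode player_letters code))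
      PySem.Set.empty)
    pvSortKey

def generate_coalition_structures_alt (n : Int) : List String :=
  pvPipelineB (if n = 3 then ['W', 'T', 'C']
    else PySem.List.slice ['A', 'B', 'C', 'D', 'E', 'F', 'G', 'H'] none (some n))

-- ===== PRECONDITION & SPEC =====
def Spec_generate_coalition_structures (n : Int) (out : List String) : Prop := out = generate_coalition_structures_alt n
instance (n : Int) (out : List String) : Decidable (Spec_generate_coalition_structures n out) := by unfold Spec_generate_coalition_structures; infer_instance

-- ===== CLAIM (what is proved, stated in full; the proofs are below) =====
def Claim_equal_generate_coalition_structures : Prop := ∀ (n : Int), Dom_generate_coalition_structures n → Spec_generate_coalition_structures n (generate_coalition_structures n)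

-- ===== LEMMAS AND PROOFS =====

-- proof-layer definitions -------------------------------------------------------

def pvSortedId (b : List Char) : List Char := PySem.List.sorted b (fun c => c)

def pvKeyLen (z : List Char) : Lex (Int × List Char) := toLex ((z.length : Int), z)

def pvSort2K (l : List (List Char)) : List (List Char) := PySem.List.sorted l pvKeyLen

def pvCanon (p : List (List Char)) : List (List Char) := pvSort2K (p.map pvSortedId)

def pvKB (player_letters : List Char) (code : List Int) : List (List Char) :=
  pvCanon ((pvBlocksOf player_letters code).filter (fun b => !b.isEmpty))

def pvInserts (f : List Char → List Char) : List (List Char) → List (List (List Char))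
  | [] => []
  | b :: t => (f b :: t) :: (pvInserts f t).map (b :: ·)

def pvMaxD (code : List Int) : Int := PySem.List.maxD code (fun v => v) (-1)

def pvValid (code : List Int) : Prop :=
  (∀ v ∈ code, 0 ≤ v) ∧ (∀ g : Nat, (g : Int) ∈ code ↔ (g : Int) < pvMaxD code + 1)

def pvRender (cp : List (List Char)) : String :=
  let co := cp.filter (fun b => b.length > 1)
  if co = [] then "( )"
  else String.ofList (PySem.Chars.join [] (co.map (fun c => '(' :: (c ++ [')']))))

-- basic order lemmas ------------------------------------------------------------

lemma pvKeyLen_inj : Function.Injective pvKeyLen := by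
  intro a b h
  unfold pvKeyLen at h
  rw [toLex_inj, Prod.mk.injEq] at h
  exact h.2

lemma pvSorted2_eq (l : List (List Char)) :
    PySem.List.sorted2 l (fun x => (x.length : Int)) (fun x => x) = pvSort2K l := by
  have hb : (fun (a b : List Char) =>
        (decide ((a.length : Int) < (b.length : Int)) ||
          (!decide ((b.length : Int) < (a.length : Int)) && decide (a < b))))
      = fun a b => decide (pvKeyLen a < pvKeyLen b) := by
    funext a b
    rcases lt_trichotomy (a.length : Int) (b.length : Int) with h1 | h1 | h1
    · have h2 : ¬ ((b.length : Int) < (a.length : Int)) := by omega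
      simp [pvKeyLen, Prod.Lex.lt_iff, h1, h2]
    · have h2 : ¬ ((a.length : Int) < (b.length : Int)) := by omega
      have h3 : ¬ ((b.length : Int) < (a.length : Int)) := by omega
      simp [pvKeyLen, Prod.Lex.lt_iff, h1, h2]
    · have h2 : ¬ ((a.length : Int) < (b.length : Int)) := by omega
      have h3 : ¬ ((a.length : Int) = (b.length : Int)) := by omega
      simp [pvKeyLen, Prod.Lex.lt_iff, h1, h2, h3]
  unfold PySem.List.sorted2 pvSort2K PySem.List.sorted
  simp only [Bool.false_eq_true, if_false]
  rw [hb]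

lemma pvSort2K_congr {l l' : List (List Char)} (h : l.Perm l') : pvSort2K l = pvSort2K l' :=
  PySem.List.eq_of_perm_of_pairwise_le_of_injective pvKeyLen pvKeyLen_inj
    (((PySem.List.sorted_perm _ _ _).trans h).trans (PySem.List.sorted_perm _ _ _).symm)
    (PySem.List.sorted_pairwise _ _) (PySem.List.sorted_pairwise _ _)

lemma pvSort2K_perm (l : List (List Char)) : (pvSort2K l).Perm l :=
  PySem.List.sorted_perm _ _ _

lemma pvSortedId_congr {b b' : List Char} (h : b.Perm b') : pvSortedId b = pvSortedId b' :=
  PySem.List.eq_of_perm_of_pairwise_le_of_injective (fun c => c) (fun _ _ hab => hab)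
    (((PySem.List.sorted_perm _ _ _).trans h).trans (PySem.List.sorted_perm _ _ _).symm)
    (PySem.List.sorted_pairwise _ _) (PySem.List.sorted_pairwise _ _)

lemma pvSort2K_filter (q : List Char → Bool) (l : List (List Char)) :
    (pvSort2K l).filter q = pvSort2K (l.filter q) := by
  refine PySem.List.eq_of_perm_of_pairwise_le_of_injective pvKeyLen pvKeyLen_inj
    ?_ (List.Pairwise.filter q (PySem.List.sorted_pairwise _ _))
    (PySem.List.sorted_pairwise _ _)
  exact ((pvSort2K_perm l).filter q).trans (pvSort2K_perm (l.filter q)).symm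

-- name factorizations -----------------------------------------------------------

lemma pvFilterPredSorted :
    ∀ b : List Char, (decide ((pvSortedId b).length > 1)) = decide (b.length > 1) := by
  intro b
  simp [pvSortedId, PySem.List.length_sorted]

lemma pvNameA_eq (p : List (List Char)) :
    pvPartitionToStateName p = pvRender (pvCanon p) := by
  have key : PySem.List.sorted2
      ((p.filter (fun s => s.length > 1)).map (fun s => PySem.List.sorted s (fun c => c)))
      (fun x => (x.length : Int)) (fun x => x)
      = (pvCanon p).filter (fun b => b.length > 1) := by
    rw [pvSorted2_eq]
    unfold pvCanon
    rw [pvSort2K_filter]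
    congr 1
    rw [show (fun s => PySem.List.sorted s (fun c => c)) = pvSortedId from rfl,
      List.filter_map]
    congr 1
    exact (List.filter_congr (fun b _ => pvFilterPredSorted b)).symm
  unfold pvPartitionToStateName pvRender
  simp only []
  rw [key]

lemma pvNameB_eq (player_letters : List Char) (code : List Int) :
    pvNameOfCode player_letters code = pvRender (pvKB player_letters code) := by
  have key : PySem.List.sorted2
      (((pvBlocksOf player_letters code).filter (fun b => b.length > 1)).map
        (fun b => PySem.List.sorted b (fun c => c)))
      (fun x => (x.length : Int)) (fun x => x)
      = (pvKB player_letters code).filter (fun b => b.length > 1) := by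
    rw [pvSorted2_eq]
    unfold pvKB pvCanon
    rw [pvSort2K_filter]
    congr 1
    rw [show (fun b => PySem.List.sorted b (fun c => c)) = pvSortedId from rfl,
      List.filter_map, List.filter_filter]
    congr 1
    refine (List.filter_congr (fun b _ => ?_)).symm
    simp only [Function.comp_apply]
    rw [pvFilterPredSorted b]
    cases b <;> simp
  unfold pvNameOfCode pvRender
  simp only []
  rw [key]

-- pipelines as sorted deduplicated name lists -----------------------------------

lemma pvSeenLoop (l : List (List (List Char))) (s : PySem.Set String) :
    l.foldl (fun (p : List String × PySem.Set String) partition =>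
        let state_name := pvPartitionToStateName partition
        if PySem.Set.contains p.2 state_name then p
        else (p.1 ++ [state_name], PySem.Set.add p.2 state_name)) (s, s)
      = (l.foldl (fun s b => PySem.Set.add s (pvPartitionToStateName b)) s,
         l.foldl (fun s b => PySem.Set.add s (pvPartitionToStateName b)) s) := by
  induction l generalizing s with
  | nil => rfl
  | cons x l ih =>
      simp only [List.foldl]
      by_cases hx : pvPartitionToStateName x ∈ s
      · have hc : PySem.Set.contains s (pvPartitionToStateName x) = true :=
          (PySem.Set.contains_iff _ _).mpr hx
        rw [if_pos hc, PySem.Set.add_of_mem hx, ih]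
      · have hc : ¬ PySem.Set.contains s (pvPartitionToStateName x) = true := by
          rw [PySem.Set.contains_iff]; exact hx
        rw [if_neg hc, ← PySem.Set.add_of_not_mem hx, ih]

lemma pvPipelineA_eq (letters : List Char) :
    pvPipelineA letters
      = PySem.List.sorted
          (PySem.Set.ofList ((pvGenAllPartitions letters).map pvPartitionToStateName))
          pvSortKey := by
  unfold pvPipelineA
  have h0 : (([], PySem.Set.empty) : List String × PySem.Set String)
      = ((PySem.Set.empty : PySem.Set String), (PySem.Set.empty : PySem.Set String)) := rfl
  rw [h0, pvSeenLoop]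
  rw [← PySem.Set.update_map_eq_foldl_add]
  rw [show (PySem.Set.empty : PySem.Set String) = [] from rfl, PySem.Set.update_nil_left]

lemma pvPipelineB_eq (letters : List Char) :
    pvPipelineB letters
      = PySem.List.sorted
          (PySem.Set.ofList ((pvBuildCodes letters).map (pvNameOfCode letters)))
          pvSortKey := by
  unfold pvPipelineB
  rw [← PySem.Set.update_map_eq_foldl_add]
  rw [show (PySem.Set.empty : PySem.Set String) = [] from rfl, PySem.Set.update_nil_left]

-- structure of the grouping pass ------------------------------------------------

lemma pvGroupFold_length (l : List (Int × Char)) (bl : List (List Char)) :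
    (l.foldl (fun b q => b.set q.1.toNat (b.getD q.1.toNat [] ++ [q.2])) bl).length
      = bl.length := by
  induction l generalizing bl with
  | nil => rfl
  | cons q t ih => rw [List.foldl_cons, ih]; simp

lemma pvGroupFold_getD (l : List (Int × Char)) (bl : List (List Char)) (g : Nat)
    (hg : g < bl.length) :
    (l.foldl (fun b q => b.set q.1.toNat (b.getD q.1.toNat [] ++ [q.2])) bl).getD g []
      = bl.getD g [] ++ (l.filter (fun q => q.1.toNat = g)).map (·.2) := by
  induction l generalizing bl with
  | nil => simp
  | cons q t ih =>
      rw [List.foldl_cons, List.filter_cons,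
        ih _ (by simpa using hg)]
      by_cases hq : q.1.toNat = g
      · subst hq
        rw [if_pos (by simp)]
        have hset : (bl.set q.1.toNat (bl.getD q.1.toNat [] ++ [q.2])).getD q.1.toNat []
            = bl.getD q.1.toNat [] ++ [q.2] := by
          rw [List.getD_eq_getElem?_getD, List.getElem?_set, if_pos rfl, if_pos hg]
          rfl
        rw [hset]
        simp [List.append_assoc]
      · rw [if_neg (by simpa using hq)]
        have hset : (bl.set q.1.toNat (bl.getD q.1.toNat [] ++ [q.2])).getD g []
            = bl.getD g [] := by
          rw [List.getD_eq_getElem?_getD, List.getElem?_set, if_neg hq,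
            ← List.getD_eq_getElem?_getD]
        rw [hset]

lemma pvBlocksOf_eq (letters : List Char) (code : List Int) :
    pvBlocksOf letters code
      = (List.range letters.length).map
          (fun g => ((code.zip letters).filter (fun q => q.1.toNat = g)).map (·.2)) := by
  unfold pvBlocksOf
  have hflen : ((code.zip letters).foldl
      (fun b q => b.set q.1.toNat (b.getD q.1.toNat [] ++ [q.2]))
      (List.replicate letters.length [])).length = letters.length := by
    rw [pvGroupFold_length]; simp
  apply List.ext_getElem?
  intro g
  by_cases hg : g < letters.length
  · rw [List.getElem?_eq_getElem (by rw [hflen]; exact hg)]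
    rw [List.getElem?_map, List.getElem?_range hg]
    simp only [Option.map_some]
    congr 1
    rw [← List.getD_eq_getElem _ [] (by rw [hflen]; exact hg)]
    rw [pvGroupFold_getD _ _ _ (by simpa using hg)]
    simp
  · rw [List.getElem?_eq_none (by rw [hflen]; omega),
      List.getElem?_eq_none (by simpa using Nat.le_of_not_lt hg)]

-- code validity invariant -------------------------------------------------------

lemma pvMaxD_isMax (code : List Int) : ∀ v ∈ code, v ≤ pvMaxD code := by
  intro v hv
  unfold pvMaxD PySem.List.maxD
  cases h : PySem.List.max? code (fun v => v) with
  | none => rw [PySem.List.max?_eq_none_iff] at h; subst h; cases hv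
  | some m => simpa using PySem.List.max?_isMax h v hv

lemma pvMaxD_cases (code : List Int) : pvMaxD code ∈ code ∨ (code = [] ∧ pvMaxD code = -1) := by
  unfold pvMaxD PySem.List.maxD
  cases h : PySem.List.max? code (fun v => v) with
  | none => exact Or.inr ⟨(PySem.List.max?_eq_none_iff _ _).mp h, rfl⟩
  | some m => exact Or.inl (by simpa using PySem.List.max?_mem h)

lemma pvMaxD_cons (v : Int) (code : List Int) (hv : 0 ≤ v) (hc : ∀ w ∈ code, 0 ≤ w) :
    pvMaxD (v :: code) = max v (pvMaxD code) := by
  apply le_antisymm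
  · rcases pvMaxD_cases (v :: code) with hm | ⟨hnil, _⟩
    · rcases List.mem_cons.mp hm with h | h
      · rw [h]; exact le_max_left _ _
      · exact le_max_of_le_right (pvMaxD_isMax code _ h)
    · cases hnil
  · apply max_le
    · exact pvMaxD_isMax (v :: code) v List.mem_cons_self
    · rcases pvMaxD_cases code with hm | ⟨hnil, hval⟩
      · exact pvMaxD_isMax (v :: code) _ (List.mem_cons_of_mem _ hm)
      · rw [hval]
        have := pvMaxD_isMax (v :: code) v List.mem_cons_self
        omega

lemma pvValid_nil : pvValid [] := by
  constructor
  · intro v hv; cases hv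
  · intro g
    constructor
    · intro hg; cases hg
    · intro hg
      exfalso
      have h0 : pvMaxD ([] : List Int) = -1 := rfl
      omega

lemma pvValid_cons {code : List Int} (h : pvValid code) {v : Int}
    (h0 : 0 ≤ v) (hv : v < pvMaxD code + 2) : pvValid (v :: code) := by
  obtain ⟨hnn, hmem⟩ := h
  have hmx := pvMaxD_cons v code h0 hnn
  constructor
  · intro w hw
    rcases List.mem_cons.mp hw with hww | hww
    · rw [hww]; exact h0
    · exact hnn w hww
  · intro g
    rw [hmx]
    constructor
    · intro hg
      rcases List.mem_cons.mp hg with hgg | hgg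
      · have := le_max_left v (pvMaxD code); omega
      · have := (hmem g).mp hgg
        have := le_max_right v (pvMaxD code); omega
    · intro hg
      by_cases hgv : (g : Int) = v
      · exact List.mem_cons.mpr (Or.inl hgv)
      · have hgc : (g : Int) < pvMaxD code + 1 := by
          rcases max_choice v (pvMaxD code) with h3 | h3 <;> rw [h3] at hg <;> omega
        exact List.mem_cons_of_mem _ ((hmem g).mpr hgc)

lemma pvFoldExtend (letters : List Char) :
    ∀ init, letters.foldl (fun codes _ => pvExtendCodes codes) (pvExtendCodes init)
      = pvExtendCodes (letters.foldl (fun codes _ => pvExtendCodes codes) init) := by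
  induction letters with
  | nil => intro init; rfl
  | cons x t ih =>
      intro init
      rw [List.foldl_cons, List.foldl_cons]
      exact ih (pvExtendCodes init)

lemma pvBuildCodes_cons (x : Char) (letters : List Char) :
    pvBuildCodes (x :: letters) = pvExtendCodes (pvBuildCodes letters) := by
  unfold pvBuildCodes
  rw [List.foldl_cons]
  exact pvFoldExtend letters [[]]

lemma pvBuildCodes_sound (letters : List Char) :
    ∀ c ∈ pvBuildCodes letters, pvValid c ∧ c.length = letters.length := by
  induction letters with
  | nil =>
      intro c hc
      have : c = [] := by simpa [pvBuildCodes] using hc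
      subst this
      exact ⟨pvValid_nil, rfl⟩
  | cons x t ih =>
      intro c hc
      rw [pvBuildCodes_cons] at hc
      unfold pvExtendCodes at hc
      simp only [List.mem_flatMap, List.mem_map] at hc
      obtain ⟨code, hcode, v, hv, rfl⟩ := hc
      obtain ⟨hval, hlen⟩ := ih code hcode
      have hv' := (PySem.List.mem_pyRange_one).mp hv
      exact ⟨pvValid_cons hval hv'.1 hv'.2, by simp [hlen]⟩

lemma pvNumGroups_le_length {code : List Int} (h : pvValid code) :
    (pvMaxD code + 1).toNat ≤ code.length := by
  have hmaps : ∀ g ∈ Finset.range (pvMaxD code + 1).toNat, ((g : Int)) ∈ code.toFinset := by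
    intro g hg
    rw [List.mem_toFinset]
    exact (h.2 g).mpr (by simp only [Finset.mem_range] at hg; omega)
  have hinj : Set.InjOn (fun g : Nat => (g : Int)) (Finset.range (pvMaxD code + 1).toNat) :=
    fun a _ b _ hab => by simpa using hab
  have hcard := Finset.card_le_card_of_injOn _ hmaps hinj
  rw [Finset.card_range] at hcard
  exact hcard.trans code.toFinset_card_le

-- the nonempty blocks of a valid code -------------------------------------------

lemma pvFilterBlocks {code : List Int} (letters : List Char) (h : pvValid code)
    (hl : code.length = letters.length) :
    (pvBlocksOf letters code).filter (fun b => !b.isEmpty)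
      = (List.range (pvMaxD code + 1).toNat).map
          (fun g => ((code.zip letters).filter (fun q => q.1.toNat = g)).map (·.2)) := by
  have hK : (pvMaxD code + 1).toNat ≤ letters.length := hl ▸ pvNumGroups_le_length h
  rw [pvBlocksOf_eq]
  rw [show letters.length = (pvMaxD code + 1).toNat + (letters.length - (pvMaxD code + 1).toNat)
      from by omega]
  rw [List.range_add, List.map_append, List.filter_append]
  have h1 : (((List.range (pvMaxD code + 1).toNat).map
        (fun g => ((code.zip letters).filter (fun q => q.1.toNat = g)).map (·.2))).filter
        (fun b => !b.isEmpty))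
      = (List.range (pvMaxD code + 1).toNat).map
          (fun g => ((code.zip letters).filter (fun q => q.1.toNat = g)).map (·.2)) := by
    rw [List.filter_eq_self]
    intro b hb
    simp only [List.mem_map, List.mem_range] at hb
    obtain ⟨g, hg, rfl⟩ := hb
    have hmem : (g : Int) ∈ code := (h.2 g).mpr (by omega)
    obtain ⟨j, hj, hcj⟩ := List.getElem_of_mem hmem
    have hjz : j < (code.zip letters).length := by
      rw [List.length_zip]; omega
    have hpair : ((g : Int), letters[j]'(by omega)) ∈ code.zip letters := by
      have := List.getElem_zip (l := code) (l' := letters) (i := j) (h := hjz)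
      rw [hcj] at this
      exact this ▸ List.getElem_mem hjz
    have : letters[j]'(by omega) ∈
        ((code.zip letters).filter (fun q => q.1.toNat = g)).map (·.2) := by
      refine List.mem_map.mpr ⟨((g : Int), letters[j]'(by omega)), ?_, rfl⟩
      refine List.mem_filter.mpr ⟨hpair, by simp⟩
    simpa using List.ne_nil_of_mem this
  have h2 : ((((List.range (letters.length - (pvMaxD code + 1).toNat)).map
        ((pvMaxD code + 1).toNat + ·)).map
        (fun g => ((code.zip letters).filter (fun q => q.1.toNat = g)).map (·.2))).filter
        (fun b => !b.isEmpty)) = [] := by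
    rw [List.filter_eq_nil_iff]
    intro b hb
    simp only [List.map_map, List.mem_map, List.mem_range, Function.comp] at hb
    obtain ⟨g, hg, rfl⟩ := hb
    have hfil : ((code.zip letters).filter
        (fun q => q.1.toNat = (pvMaxD code + 1).toNat + g)) = [] := by
      rw [List.filter_eq_nil_iff]
      intro q hq
      have hq1 : q.1 ∈ code := (List.of_mem_zip hq).1
      have hq0 : 0 ≤ q.1 := h.1 q.1 hq1
      have : ((q.1.toNat : Int)) ∈ code := by
        rwa [Int.toNat_of_nonneg hq0]
      have := (h.2 q.1.toNat).mp this
      simp only [decide_eq_true_eq]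
      omega
    rw [hfil]
    simp
  rw [h1, h2, List.append_nil]

-- branch lists -------------------------------------------------------------------

lemma pvInserts_eq_range (f : List Char → List Char) (l : List (List Char)) :
    pvInserts f l = (List.range l.length).map (fun i => l.set i (f (l.getD i []))) := by
  induction l with
  | nil => rfl
  | cons b t ih =>
      show (f b :: t) :: (pvInserts f t).map (b :: ·) = _
      rw [List.length_cons, List.range_succ_eq_map, List.map_cons, List.map_map, ih,
        List.map_map]
      congr 1

lemma pvSortedId_perm (b : List Char) : (pvSortedId b).Perm b :=
  PySem.List.sorted_perm _ _ _

lemma pvEnumerate_getElem? (p : List (List Char)) :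
    ∀ (s : Int) (i : Nat),
      (PySem.List.enumerate p s)[i]? = p[i]?.map (fun b => (s + i, b)) := by
  induction p with
  | nil => intro s i; simp [PySem.List.enumerate]
  | cons b t ih =>
      intro s i
      cases i with
      | zero => simp [PySem.List.enumerate]
      | succ i =>
          have hstep : PySem.List.enumerate (b :: t) s = (s, b) :: PySem.List.enumerate t (s + 1) := by
            simp [PySem.List.enumerate]
          rw [hstep, List.getElem?_cons_succ, ih (s + 1) i]
          have hfn : (fun (b : List Char) => (s + 1 + (i : Int), b))
              = fun (b : List Char) => (s + ((i + 1 : Nat) : Int), b) := by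
            funext b
            congr 1
            push_cast
            ring
          rw [hfn, List.getElem?_cons_succ]

lemma pvBranchesA_eq (p : List (List Char)) (x : Char) :
    (PySem.List.enumerate p).map (fun q =>
        PySem.List.slice p none (some q.1) ++ [q.2 ++ [x]] ++
          PySem.List.slice p (some (q.1 + 1)) none)
      = pvInserts (fun b => b ++ [x]) p := by
  rw [pvInserts_eq_range]
  apply List.ext_getElem?
  intro i
  rw [List.getElem?_map, pvEnumerate_getElem?, List.getElem?_map]
  by_cases hi : i < p.length
  · rw [List.getElem?_eq_getElem hi, List.getElem?_range hi]
    simp only [Option.map_some]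
    congr 1
    rw [zero_add]
    rw [PySem.List.slice_to_natCast]
    rw [show ((i : Int) + 1) = (((i + 1 : Nat)) : Int) by push_cast; ring]
    rw [PySem.List.slice_from_natCast]
    rw [List.getD_eq_getElem _ _ hi]
    rw [List.set_eq_take_cons_drop _ hi]
    simp [List.append_assoc]
  · rw [List.getElem?_eq_none (by omega : p.length ≤ i),
      List.getElem?_eq_none (by simp; omega)]
    rfl

lemma pvMapCanonInserts (x : Char) (p : List (List Char)) (pre : List (List Char)) :
    (pvInserts (fun b => b ++ [x]) p).map (fun z => pvSort2K (pre ++ z.map pvSortedId))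
      = (pvInserts (fun z => pvSortedId (z ++ [x])) (p.map pvSortedId)).map
          (fun z => pvSort2K (pre ++ z)) := by
  induction p generalizing pre with
  | nil => rfl
  | cons b t ih =>
      simp only [pvInserts, List.map_cons, List.map_map]
      congr 1
      · have hh : pvSortedId (b ++ [x]) = pvSortedId (pvSortedId b ++ [x]) :=
          pvSortedId_congr ((pvSortedId_perm b).symm.append_right [x])
        rw [hh]
      · have e1 : ((fun z => pvSort2K (pre ++ z.map pvSortedId)) ∘ (b :: ·))
            = fun z => pvSort2K ((pre ++ [pvSortedId b]) ++ z.map pvSortedId) := by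
          funext z
          simp only [Function.comp_apply, List.map_cons]
          rw [List.append_cons]
        have e2 : ((fun z => pvSort2K (pre ++ z)) ∘ (pvSortedId b :: ·))
            = fun z => pvSort2K ((pre ++ [pvSortedId b]) ++ z) := by
          funext z
          simp only [Function.comp_apply]
          rw [List.append_cons]
        rw [e1, e2]
        exact ih (pre ++ [pvSortedId b])

lemma pvInsertsPermCongr (f : List Char → List Char) {ms ms' : List (List Char)}
    (h : ms.Perm ms') (pre : List (List Char)) :
    ((pvInserts f ms).map (fun z => pvSort2K (pre ++ z))).Perm
      ((pvInserts f ms').map (fun z => pvSort2K (pre ++ z))) := by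
  induction h generalizing pre with
  | nil => simp [pvInserts]
  | @cons a t₁ t₂ h ih =>
      simp only [pvInserts, List.map_cons, List.map_map]
      rw [show pvSort2K (pre ++ f a :: t₁) = pvSort2K (pre ++ f a :: t₂) from
        pvSort2K_congr (List.Perm.append_left pre (h.cons (f a)))]
      refine List.Perm.cons _ ?_
      have e1 : ((fun z => pvSort2K (pre ++ z)) ∘ (a :: ·))
          = fun z => pvSort2K ((pre ++ [a]) ++ z) := by
        funext z
        simp only [Function.comp_apply]
        rw [List.append_cons]
      rw [e1]
      exact ih (pre ++ [a])
  | @swap x y l =>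
      simp only [pvInserts, List.map_cons, List.map_map]
      have a1 : pvSort2K (pre ++ f y :: x :: l) = pvSort2K (pre ++ x :: f y :: l) :=
        pvSort2K_congr (List.Perm.append_left pre (List.Perm.swap x (f y) l))
      have a2 : pvSort2K (pre ++ y :: f x :: l) = pvSort2K (pre ++ f x :: y :: l) :=
        pvSort2K_congr (List.Perm.append_left pre (List.Perm.swap (f x) y l))
      rw [a1, a2]
      have e3 : (pvInserts f l).map
            ((fun z => pvSort2K (pre ++ z)) ∘ (fun z => y :: z) ∘ fun z => x :: z)
          = (pvInserts f l).map
            ((fun z => pvSort2K (pre ++ z)) ∘ (fun z => x :: z) ∘ fun z => y :: z) :=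
        List.map_congr_left (fun z _ => by
          simp only [Function.comp_apply]
          exact pvSort2K_congr (List.Perm.append_left pre (List.Perm.swap x y z)))
      rw [e3]
      exact List.Perm.swap _ _ _
  | trans h₁ h₂ ih₁ ih₂ => exact (ih₁ pre).trans (ih₂ pre)

lemma pvFlatMapPerm {α β γ κ : Type} (k₁ : α → κ) (k₂ : β → κ)
    (f₁ : α → List γ) (f₂ : β → List γ) :
    ∀ (l₁ : List α) (l₂ : List β),
      (∀ a ∈ l₁, ∀ b ∈ l₂, k₁ a = k₂ b → (f₁ a).Perm (f₂ b)) →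
      (l₁.map k₁).Perm (l₂.map k₂) → (l₁.flatMap f₁).Perm (l₂.flatMap f₂) := by
  intro l₁
  induction l₁ with
  | nil =>
      intro l₂ _ hperm
      have h2 : l₂.map k₂ = [] := (hperm.symm).eq_nil
      have : l₂ = [] := by simpa using h2
      subst this
      rfl
  | cons a t ih =>
      intro l₂ hf hperm
      have ha : k₁ a ∈ l₂.map k₂ := hperm.subset (by simp)
      obtain ⟨b, hb, hkb⟩ := List.mem_map.mp ha
      obtain ⟨u, v, rfl⟩ := List.append_of_mem hb
      have hmid : ((u ++ b :: v).map k₂).Perm (k₂ b :: (u ++ v).map k₂) := by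
        simp only [List.map_append, List.map_cons]
        exact List.perm_middle
      have h2 : ((k₁ a :: t.map k₁)).Perm (k₁ a :: (u ++ v).map k₂) := by
        have := hperm.trans hmid
        rwa [hkb] at this
      have h3 : (t.map k₁).Perm ((u ++ v).map k₂) := h2.cons_inv
      have hff : ∀ a' ∈ t, ∀ b' ∈ u ++ v, k₁ a' = k₂ b' → (f₁ a').Perm (f₂ b') := by
        intro a' ha' b' hb' hk
        refine hf a' (List.mem_cons_of_mem _ ha') b' ?_ hk
        rcases List.mem_append.mp hb' with hm | hm
        · exact List.mem_append.mpr (Or.inl hm)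
        · exact List.mem_append.mpr (Or.inr (List.mem_cons_of_mem _ hm))
      have hrec := ih (u ++ v) hff h3
      have hfa : (f₁ a).Perm (f₂ b) := hf a List.mem_cons_self b hb hkb.symm
      have hstep : ((u ++ b :: v).flatMap f₂).Perm (f₂ b ++ (u ++ v).flatMap f₂) := by
        simp only [List.flatMap_append, List.flatMap_cons]
        have ha1 : u.flatMap f₂ ++ (f₂ b ++ v.flatMap f₂)
            = (u.flatMap f₂ ++ f₂ b) ++ v.flatMap f₂ := by rw [List.append_assoc]
        have h5 : ((u.flatMap f₂ ++ f₂ b) ++ v.flatMap f₂).Perm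
            ((f₂ b ++ u.flatMap f₂) ++ v.flatMap f₂) :=
          (List.perm_append_comm).append_right _
        have h6 : (f₂ b ++ u.flatMap f₂) ++ v.flatMap f₂
            = f₂ b ++ (u.flatMap f₂ ++ v.flatMap f₂) := by rw [List.append_assoc]
        rw [ha1, ← h6]
        exact h5
      have h4 : ((a :: t).flatMap f₁) = f₁ a ++ t.flatMap f₁ := by
        simp [List.flatMap_cons]
      rw [h4]
      exact (hfa.append hrec).trans hstep.symm

-- the core branch correspondence -------------------------------------------------

def pvContent (code : List Int) (rest : List Char) (g : Nat) : List Char :=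
  ((code.zip rest).filter (fun q => q.1.toNat = g)).map (·.2)

def pvBL (code : List Int) (rest : List Char) : List (List Char) :=
  (List.range (pvMaxD code + 1).toNat).map (pvContent code rest)

lemma pvMaxD_add_one_nonneg {code : List Int} (hv : pvValid code) :
    0 ≤ pvMaxD code + 1 := by
  rcases pvMaxD_cases code with hm | ⟨_, hval⟩
  · have := hv.1 _ hm; omega
  · omega

lemma pvRangeMapSet {α : Type} (f : Nat → α) (n j : Nat) (g : α) (hj : j < n) :
    (List.range n).map (fun i => if i = j then g else f i) = ((List.range n).map f).set j g := by
  apply List.ext_getElem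
  · simp
  · intro i h1 h2
    simp only [List.getElem_map, List.getElem_range]
    rw [List.getElem_set]
    by_cases hij : i = j
    · subst hij; simp
    · rw [if_neg (show ¬ i = j from hij), if_neg (show ¬ j = i by omega)]
      simp

lemma pvMapGetD {α β : Type} (f : α → β) (l : List α) (i : Nat) (h : i < l.length)
    (d : α) (d' : β) : (l.map f).getD i d' = f (l.getD i d) := by
  rw [List.getD_eq_getElem _ _ (by simpa using h), List.getD_eq_getElem _ _ h,
    List.getElem_map]

lemma pvBL_getD (code : List Int) (rest : List Char) (g : Nat)
    (hg : g < (pvMaxD code + 1).toNat) :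
    (pvBL code rest).getD g [] = pvContent code rest g := by
  unfold pvBL
  rw [List.getD_eq_getElem _ _ (by simpa using hg)]
  simp

lemma pvSortedId_snoc (x : Char) (c : List Char) :
    pvSortedId (x :: c) = pvSortedId (pvSortedId c ++ [x]) := by
  apply pvSortedId_congr
  have h1 : (x :: pvSortedId c).Perm (x :: c) := (pvSortedId_perm c).cons x
  have h2 : (pvSortedId c ++ [x]).Perm (x :: (pvSortedId c ++ [])) := List.perm_middle
  exact h1.symm.trans (by simpa using h2.symm)

lemma pvKB_insert (x : Char) (rest : List Char) (code : List Int) (hv : pvValid code)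
    (hlen : code.length = rest.length) (g : Nat) (hg : (g : Int) < pvMaxD code + 1) :
    pvKB (x :: rest) ((g : Int) :: code)
      = pvSort2K (((pvBL code rest).map pvSortedId).set g
          (pvSortedId (x :: pvContent code rest g))) := by
  have hg0 : (0 : Int) ≤ (g : Int) := by positivity
  have hmx : pvMaxD ((g : Int) :: code) = pvMaxD code := by
    rw [pvMaxD_cons _ _ hg0 hv.1]
    exact max_eq_right (by omega)
  have hval' : pvValid ((g : Int) :: code) := pvValid_cons hv hg0 (by omega)
  have hlen' : ((g : Int) :: code).length = (x :: rest).length := by simp [hlen]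
  unfold pvKB
  rw [pvFilterBlocks (x :: rest) hval' hlen', hmx]
  unfold pvCanon
  congr 1
  rw [← List.map_set]
  congr 1
  have hpt : ∀ g' ∈ List.range (pvMaxD code + 1).toNat,
      ((((g : Int) :: code).zip (x :: rest)).filter (fun q => q.1.toNat = g')).map (·.2)
        = (fun i => if i = g then x :: pvContent code rest g else pvContent code rest i) g' := by
    intro g' _
    show _ = if g' = g then _ else _
    rw [show ((g : Int) :: code).zip (x :: rest) = ((g : Int), x) :: code.zip rest from rfl,
      List.filter_cons]
    by_cases hgg : g' = g
    · subst hgg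
      rw [if_pos (by simp), if_pos rfl]
      simp [pvContent]
    · rw [if_neg (by simp only [Int.toNat_natCast, decide_eq_true_eq]; omega), if_neg hgg]
      simp [pvContent]
  rw [List.map_congr_left hpt]
  unfold pvBL
  have hK0 : 0 ≤ pvMaxD code + 1 := pvMaxD_add_one_nonneg hv
  exact pvRangeMapSet (pvContent code rest) ((pvMaxD code + 1).toNat) g
    (x :: pvContent code rest g) (by omega)

lemma pvKB_new (x : Char) (rest : List Char) (code : List Int) (hv : pvValid code)
    (hlen : code.length = rest.length) :
    pvKB (x :: rest) ((pvMaxD code + 1) :: code)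
      = pvSort2K (((pvBL code rest).map pvSortedId) ++ [[x]]) := by
  have hK0 : 0 ≤ pvMaxD code + 1 := pvMaxD_add_one_nonneg hv
  have hmx : pvMaxD ((pvMaxD code + 1) :: code) = pvMaxD code + 1 := by
    rw [pvMaxD_cons _ _ hK0 hv.1]
    exact max_eq_left (by omega)
  have hval' : pvValid ((pvMaxD code + 1) :: code) := pvValid_cons hv hK0 (by omega)
  have hlen' : ((pvMaxD code + 1) :: code).length = (x :: rest).length := by simp [hlen]
  unfold pvKB
  rw [pvFilterBlocks (x :: rest) hval' hlen', hmx]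
  unfold pvCanon
  congr 1
  have hKn : (pvMaxD code + 1 + 1).toNat = (pvMaxD code + 1).toNat + 1 := by omega
  rw [hKn, List.range_succ, List.map_append, List.map_append]
  congr 1
  · -- the first (pvMaxD code + 1).toNat groups are unchanged
    rw [show ((pvMaxD code + 1) :: code).zip (x :: rest)
        = ((pvMaxD code + 1), x) :: code.zip rest from rfl]
    congr 1
    apply List.map_congr_left
    intro g' hg'
    simp only [List.mem_range] at hg'
    rw [List.filter_cons, if_neg (by simp only [decide_eq_true_eq]; omega)]
    simp [pvContent]
  · -- the new group is the singleton [x]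
    rw [show ((pvMaxD code + 1) :: code).zip (x :: rest)
        = ((pvMaxD code + 1), x) :: code.zip rest from rfl]
    simp only [List.map_cons, List.map_nil, List.filter_cons]
    rw [if_pos (by simp)]
    have hempty : ((code.zip rest).filter
        (fun q => q.1.toNat = (pvMaxD code + 1).toNat)) = [] := by
      rw [List.filter_eq_nil_iff]
      intro q hq
      have hq1 : q.1 ∈ code := (List.of_mem_zip hq).1
      have hq0 : 0 ≤ q.1 := hv.1 q.1 hq1
      have : ((q.1.toNat : Int)) ∈ code := by rwa [Int.toNat_of_nonneg hq0]
      have := (hv.2 q.1.toNat).mp this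
      simp only [decide_eq_true_eq]
      omega
    rw [hempty]
    rfl

lemma pvRange_split (code : List Int) (hv : pvValid code) :
    PySem.List.pyRange 0 (PySem.List.maxD code (fun v => v) (-1) + 2) 1
      = PySem.List.pyRange 0 (pvMaxD code + 1) 1 ++ [pvMaxD code + 1] := by
  have hK0 : 0 ≤ pvMaxD code + 1 := pvMaxD_add_one_nonneg hv
  have h1 : PySem.List.maxD code (fun v => v) (-1) + 2 = (pvMaxD code + 1) + 1 := by
    unfold pvMaxD
    ring
  rw [h1, PySem.List.pyRange_one_append 0 (pvMaxD code + 1) ((pvMaxD code + 1) + 1)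
    (by omega) (by omega)]
  congr 1
  rw [PySem.List.pyRange_one_cons (by omega), PySem.List.pyRange_one]
  simp

lemma pvCore (x : Char) (rest : List Char) (p : List (List Char)) (code : List Int)
    (hv : pvValid code) (hlen : code.length = rest.length)
    (hk : pvCanon p = pvKB rest code) :
    (((PySem.List.enumerate p).map (fun q =>
        PySem.List.slice p none (some q.1) ++ [q.2 ++ [x]] ++
          PySem.List.slice p (some (q.1 + 1)) none) ++ [[x] :: p]).map pvCanon).Perm
      ((((PySem.List.pyRange 0 (PySem.List.maxD code (fun v => v) (-1) + 2) 1).map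
          (fun v => v :: code))).map (pvKB (x :: rest))) := by
  have hK0 : 0 ≤ pvMaxD code + 1 := pvMaxD_add_one_nonneg hv
  have hbl' : (pvBlocksOf rest code).filter (fun b => !b.isEmpty) = pvBL code rest := by
    rw [pvFilterBlocks rest hv hlen]
    rfl
  have hmsPerm : (p.map pvSortedId).Perm ((pvBL code rest).map pvSortedId) := by
    have h1 : pvSort2K (p.map pvSortedId) = pvSort2K ((pvBL code rest).map pvSortedId) := by
      have h2 := hk
      unfold pvKB pvCanon at h2
      rw [hbl'] at h2
      exact h2
    exact (pvSort2K_perm _).symm.trans (h1 ▸ pvSort2K_perm _)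
  rw [pvBranchesA_eq, List.map_append]
  rw [pvRange_split code hv, List.map_append, List.map_append]
  have hA : (pvInserts (fun b => b ++ [x]) p).map pvCanon
      = (pvInserts (fun z => pvSortedId (z ++ [x])) (p.map pvSortedId)).map pvSort2K := by
    have h1 := pvMapCanonInserts x p []
    simpa [pvCanon] using h1
  rw [hA]
  have hK0 : 0 ≤ pvMaxD code + 1 := pvMaxD_add_one_nonneg hv
  have hBins : ((PySem.List.pyRange 0 (pvMaxD code + 1) 1).map
        (fun v => v :: code)).map (pvKB (x :: rest))
      = (pvInserts (fun z => pvSortedId (z ++ [x]))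
          ((pvBL code rest).map pvSortedId)).map pvSort2K := by
    rw [PySem.List.pyRange_zero, pvInserts_eq_range, List.map_map, List.map_map,
      List.map_map]
    rw [show ((pvBL code rest).map pvSortedId).length = (pvMaxD code + 1).toNat from
      by simp [pvBL]]
    apply List.map_congr_left
    intro g hg
    simp only [List.mem_range] at hg
    simp only [Function.comp_apply]
    rw [pvKB_insert x rest code hv hlen g (by omega)]
    congr 2
    rw [pvMapGetD pvSortedId _ _ (by simp [pvBL]; omega) []]
    rw [pvBL_getD code rest g hg]
    exact pvSortedId_snoc x (pvContent code rest g)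
  rw [hBins]
  have hnew : pvCanon ([x] :: p)
      = pvSort2K (((pvBL code rest).map pvSortedId) ++ [[x]]) := by
    unfold pvCanon
    rw [List.map_cons]
    rw [show pvSortedId [x] = [x] from rfl]
    apply pvSort2K_congr
    refine (hmsPerm.cons [x]).trans ?_
    have h4 : (((pvBL code rest).map pvSortedId) ++ [[x]]).Perm
        ([x] :: (((pvBL code rest).map pvSortedId) ++ [])) := List.perm_middle
    simpa using h4.symm
  simp only [List.map_cons, List.map_nil]
  rw [hnew, pvKB_new x rest code hv hlen]
  refine List.Perm.append ?_ (List.Perm.refl _)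
  have h3 := pvInsertsPermCongr (fun z => pvSortedId (z ++ [x])) hmsPerm []
  simpa using h3

-- the main permutation ------------------------------------------------------------

lemma pvMainPerm (letters : List Char) :
    ((pvGenAllPartitions letters).map pvCanon).Perm
      ((pvBuildCodes letters).map (pvKB letters)) := by
  induction letters with
  | nil => exact List.Perm.refl _
  | cons x rest ih =>
      cases rest with
      | nil =>
          have h1 : (pvGenAllPartitions [x]).map pvCanon
              = (pvBuildCodes [x]).map (pvKB [x]) := rfl
          rw [h1]
      | cons y rs =>
          rw [pvBuildCodes_cons]
          have hgen : pvGenAllPartitions (x :: y :: rs)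
              = (pvGenAllPartitions (y :: rs)).flatMap (fun partition =>
                  ((PySem.List.enumerate partition).map (fun q =>
                    PySem.List.slice partition none (some q.1) ++ [q.2 ++ [x]] ++
                      PySem.List.slice partition (some (q.1 + 1)) none))
                  ++ [[x] :: partition]) := rfl
          rw [hgen]
          unfold pvExtendCodes
          rw [List.map_flatMap, List.map_flatMap]
          refine pvFlatMapPerm pvCanon (pvKB (y :: rs)) _ _ _ _ ?_ ih
          intro p hp c hc hpc
          obtain ⟨hcv, hclen⟩ := pvBuildCodes_sound (y :: rs) c hc
          exact pvCore x (y :: rs) p c hcv hclen hpc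

-- assembling the final equality ---------------------------------------------------

lemma pvSortKey_inj : Function.Injective pvSortKey := by
  intro s t h
  unfold pvSortKey at h
  split_ifs at h with hs ht ht
  · rw [hs, ht]
  · exfalso
    rw [toLex_inj, Prod.mk.injEq] at h
    have h1 := h.1
    have hlen : (0 : Int) ≤ ((PySem.Chars.splitOn (PySem.Chars.stripChars t.toList ['(', ')']) [')', '(']).length : Int) := by positivity
    have hsum : (0 : Int) ≤ ((PySem.Chars.splitOn (PySem.Chars.stripChars t.toList ['(', ')']) [')', '(']).map (fun c => (c.length : Int))).sum := by
      apply List.sum_nonneg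
      intro y hy
      simp only [List.mem_map] at hy
      obtain ⟨c, _, rfl⟩ := hy
      positivity
    omega
  · exfalso
    rw [toLex_inj, Prod.mk.injEq] at h
    have h1 := h.1
    have hlen : (0 : Int) ≤ ((PySem.Chars.splitOn (PySem.Chars.stripChars s.toList ['(', ')']) [')', '(']).length : Int) := by positivity
    have hsum : (0 : Int) ≤ ((PySem.Chars.splitOn (PySem.Chars.stripChars s.toList ['(', ')']) [')', '(']).map (fun c => (c.length : Int))).sum := by
      apply List.sum_nonneg
      intro y hy
      simp only [List.mem_map] at hy
      obtain ⟨c, _, rfl⟩ := hy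
      positivity
    omega
  · rw [toLex_inj, Prod.mk.injEq] at h
    exact h.2

lemma pvOfListPerm {l l' : List String} (h : l.Perm l') :
    (PySem.Set.ofList l).Perm (PySem.Set.ofList l') := by
  rw [List.perm_ext_iff_of_nodup (PySem.Set.nodup_ofList l) (PySem.Set.nodup_ofList l')]
  intro a
  rw [PySem.Set.mem_ofList, PySem.Set.mem_ofList]
  exact ⟨fun ha => h.mem_iff.mp ha, fun ha => h.mem_iff.mpr ha⟩

lemma pvFinal (letters : List Char) : pvPipelineA letters = pvPipelineB letters := by
  rw [pvPipelineA_eq, pvPipelineB_eq]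
  have hnames : ((pvGenAllPartitions letters).map pvPartitionToStateName).Perm
      ((pvBuildCodes letters).map (pvNameOfCode letters)) := by
    have h1 : (pvGenAllPartitions letters).map pvPartitionToStateName
        = ((pvGenAllPartitions letters).map pvCanon).map pvRender := by
      rw [List.map_map]; exact List.map_congr_left (fun p _ => pvNameA_eq p)
    have h2 : (pvBuildCodes letters).map (pvNameOfCode letters)
        = ((pvBuildCodes letters).map (pvKB letters)).map pvRender := by
      rw [List.map_map]; exact List.map_congr_left (fun c _ => pvNameB_eq letters c)
    rw [h1, h2]
    exact (pvMainPerm letters).map pvRender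
  have hperm := pvOfListPerm hnames
  exact PySem.List.eq_of_perm_of_pairwise_le_of_injective pvSortKey pvSortKey_inj
    (((PySem.List.sorted_perm _ _ _).trans hperm).trans (PySem.List.sorted_perm _ _ _).symm)
    (PySem.List.sorted_pairwise _ _) (PySem.List.sorted_pairwise _ _)

-- ===== VERDICT (by name: the statement is the Claim_ definition above) =====
theorem generate_coalition_structures_spec : Claim_equal_generate_coalition_structures := by
  intro n _
  unfold Spec_generate_coalition_structures
  unfold generate_coalition_structures generate_coalition_structures_alt
  exact pvFinal _
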